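-- pv_equiv track=rewrite | github.com/Dimitrije-Jimmy/AdventOfCode2024 | day17/main7.py | solve_outputs
-- ===== SOURCE A (Python) =====
-- def f(A):
--     B = (A % 8) ^ 2
--     C = A >> B
--     return (B ^ C ^ 3) % 8
--
-- def solve_outputs(outputs):
--     """
--     Given a sequence of outputs, find all possible initial A values that produce them.
--     We'll implement the backward logic described.
--     """
--
--     # Start with the first output:
--     # We know f(A) only depends on A mod 2^10 = A & 1023.
--     # For the first output, find all A in [0..1023] that produce outputs[0].
--     desired_out = outputs[0]
--     current_set = []
--     #for a_candidate in range(1024):  # 2^10 = 1024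
--     for a_candidate in range(1048576):  # 2^10 = 1024
--         if f(a_candidate) == desired_out:
--             current_set.append(a_candidate)
--
--     # current_set now holds all 10-bit numbers that produce the first output.
--
--     # For subsequent outputs:
--     # After each iteration, A was shifted by 3 bits forward, so backward we must:
--     # - For each candidate in current_set (which is (10 + 3*i)-bit number),
--     #   we "add" 3 bits in front by testing all 8 possibilities.
--     # - Check if they produce the next output.
--     # - Keep only those that match.
--
--     # We'll track how many bits we currently consider. Initially 10 bits after first output.
--     bit_length = 10
--
--     # For each subsequent output:
--     for i in range(1, len(outputs)):
--         next_out = outputs[i]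
--         new_set = []
--         bit_length += 3  # each iteration adds 3 more bits from going backward.
--
--         # To go backward:
--         # current candidates represent A values AFTER i-th iteration (so they produce out[i]).
--         # Before shifting by 3 bits (forward direction), the original A had 3 extra bits.
--         # So we take each current candidate and generate all 8 expansions:
--         # newA = (candidate << 3) + x, for x in [0..7].
--         # Check if f(newA) == next_out.
--
--         # Note: We must still consider f(newA) mod 2^10 only depends on lower 10 bits of newA.
--         # But because we are building sets step-by-step, we keep the full integer.
--         # If performance is an issue, we could store only the necessary bits.
--         # Here we store full int and rely on Python's integer handling.
--
--         for c in current_set: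
--             base = c << 3
--             for x in range(8):
--                 candidate = base + x
--                 # candidate now has (bit_length) bits considered.
--                 # Check output:
--                 if f(candidate) == next_out:
--                     new_set.append(candidate)
--
--         current_set = new_set
--
--         if not current_set:
--             # No candidates match at this stage, no solution
--             return []
--
--     # After processing all outputs, current_set contains all possible A values (with bit_length bits)
--     # that produce the entire output sequence from first to last iteration.
--     # Actually, these represent the final A before the last iteration is reversed back to the start.
--     # In a real scenario, after N iterations, you'd have the full original A since we kept adding bits.
--
--     return current_set
-- ===== SOURCE B (Python) =====
-- def f(A):
--     B = (A % 8) ^ 2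
--     C = A >> B
--     return (B ^ C ^ 3) % 8
--
-- def solve_outputs(outputs):
--     # f depends only on the low 10 bits: memoize it over the 1024 residues
--     table = [f(v) for v in range(1024)]
--     low = [r for r in range(1024) if table[r] == outputs[0]]
--     # every 20-bit candidate = any 10 high bits in front of a matching low part
--     current = [(j << 10) | r for j in range(1024) for r in low]
--     # for each 7-bit low part of a previous candidate and each output digit,
--     # precompute the 3-bit extensions x with f((c << 3) + x) == digit
--     ext = [[[x for x in range(8) if table[(c7 << 3) + x] == d] for d in range(8)]
--            for c7 in range(128)]
--     for nxt in outputs[1:]: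
--         if not (0 <= nxt < 8):
--             return []
--         current = [(c << 3) + x for c in current for x in ext[c & 127][nxt]]
--         if not current:
--             return []
--     return current
-- ===== Notes on version B (the rewrite author's own statement) =====
-- stated objective: faster
-- what changed: B memoizes f over its 1024 residues, generates the first candidate set structurally as every 10 high bits prepended to a matching 10-bit residue instead of scanning all 2^20 values, and replaces the inner 8-way trial loop by precomputed 3-bit extension lists keyed by (candidate & 127, next output).
import Mathlib
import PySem

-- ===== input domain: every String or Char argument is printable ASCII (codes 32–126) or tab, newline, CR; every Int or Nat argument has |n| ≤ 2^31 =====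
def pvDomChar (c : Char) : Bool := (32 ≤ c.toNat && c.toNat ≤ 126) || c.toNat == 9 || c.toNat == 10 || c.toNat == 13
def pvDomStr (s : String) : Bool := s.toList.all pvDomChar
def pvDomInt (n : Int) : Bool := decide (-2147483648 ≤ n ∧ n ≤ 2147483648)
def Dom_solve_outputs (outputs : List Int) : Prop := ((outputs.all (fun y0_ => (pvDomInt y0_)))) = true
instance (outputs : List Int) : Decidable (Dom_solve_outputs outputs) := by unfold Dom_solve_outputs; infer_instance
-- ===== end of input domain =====

-- B replaces A's 2^20-candidate scan and its inner 8-way trial loop by a 1024-entry memo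
-- table of f, a structurally generated first set and precomputed 3-bit extension lists
-- (objective: faster, constant-factor). Equivalence of return values is proved on Pre_
-- (outputs nonempty; Python raises IndexError on the empty list).

-- ===== PORT A =====
-- helper f (identical in Source A and Source B): B = (A % 8) ^ 2; C = A >> B; (B ^ C ^ 3) % 8
-- (the shift amount B is always in [0,8), so '>>> B.toNat' is exact)
def pyF (A : Int) : Int :=
  let B := PySem.Int.bxor (PySem.Int.mod A 8) 2
  let C := A >>> B.toNat
  PySem.Int.mod (PySem.Int.bxor (PySem.Int.bxor B C) 3) 8

-- A's 'for i in range(1, len(outputs))' loop with its early 'return []'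
def solveLoopA (cur : List Int) (rest : List Int) : List Int :=
  match rest with
  | [] => cur
  | nxt :: rs =>
    let ns := cur.foldl (fun (acc : List Int) (c : Int) =>
      (PySem.List.pyRange 0 8).foldl (fun (acc2 : List Int) (x : Int) =>
        if pyF ((c <<< (3 : Nat)) + x) == nxt then acc2 ++ [(c <<< (3 : Nat)) + x]
        else acc2) acc) []
    if ns = [] then [] else solveLoopA ns rs

def solve_outputs (outputs : List Int) : List Int :=
  match outputs with
  | [] => []   -- Python raises IndexError reading the first output; excluded by Pre_
  | d :: rest =>
    let cur := (PySem.List.pyRange 0 1048576).foldl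
      (fun (acc : List Int) (a : Int) => if pyF a == d then acc ++ [a] else acc) []
    solveLoopA cur rest

-- ===== PORT B =====
-- table = [f(v) for v in range(1024)]
def bTable : List Int := (PySem.List.pyRange 0 1024).map pyF

-- ext = [[[x for x in range(8) if table[(c7 << 3) + x] == d] for d in range(8)] for c7 in range(128)]
def bExt : List (List (List Int)) :=
  (PySem.List.pyRange 0 128).map (fun (c7 : Int) =>
    (PySem.List.pyRange 0 8).map (fun dd =>
      (PySem.List.pyRange 0 8).filter (fun x =>
        PySem.List.pyGetD bTable ((c7 <<< (3 : Nat)) + x) 0 == dd)))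

-- Source B's 'for nxt in outputs[1:]' loop with its two early 'return []'s
def solveLoopB (cur : List Int) (rest : List Int) : List Int :=
  match rest with
  | [] => cur
  | nxt :: rs =>
    if 0 ≤ nxt ∧ nxt < 8 then
      let cur' := cur.flatMap (fun (c : Int) =>
        (PySem.List.pyGetD (PySem.List.pyGetD bExt (PySem.Int.band c 127) []) nxt []).map
          (fun x => (c <<< (3 : Nat)) + x))
      if cur' = [] then [] else solveLoopB cur' rs
    else []

def solve_outputs_alt (outputs : List Int) : List Int :=
  match outputs with
  | [] => []   -- Source B raises IndexError here too; excluded by Pre_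
  | d :: rest =>
    let low := (PySem.List.pyRange 0 1024).filter (fun r => PySem.List.pyGetD bTable r 0 == d)
    let cur := (PySem.List.pyRange 0 1024).flatMap
      (fun (j : Int) => low.map (fun r => PySem.Int.bor (j <<< (10 : Nat)) r))
    solveLoopB cur rest

-- ===== PRECONDITION & SPEC =====
-- Pre_ excludes only the empty list, on which both Pythons raise IndexError reading the first output.
def Pre_solve_outputs (outputs : List Int) : Prop := outputs ≠ []
instance (outputs : List Int) : Decidable (Pre_solve_outputs outputs) := by
  unfold Pre_solve_outputs; infer_instance

def pvWitness_solve_outputs : List Int := [3]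

def Spec_solve_outputs (outputs : List Int) (out : List Int) : Prop := out = solve_outputs_alt outputs
instance (outputs : List Int) (out : List Int) : Decidable (Spec_solve_outputs outputs out) := by
  unfold Spec_solve_outputs; infer_instance

-- ===== CLAIM (what is proved, stated in full; the proofs are below) =====
def Claim_equal_solve_outputs : Prop := ∀ (outputs : List Int), Dom_solve_outputs outputs → Pre_solve_outputs outputs → Spec_solve_outputs outputs (solve_outputs outputs)

-- ===== LEMMAS AND PROOFS =====

-- the Nat value of f on a nonnegative argument
def fN (n : Nat) : Nat :=
  let b := (n % 8) ^^^ 2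
  ((b ^^^ (n >>> b)) ^^^ 3) % 8

theorem pyF_natCast (n : Nat) : pyF (↑n) = ↑(fN n) := by
  unfold pyF fN
  have h1 : PySem.Int.mod (↑n) 8 = ↑(n % 8) := by exact_mod_cast PySem.Int.mod_natCast n 8
  have h2 : PySem.Int.bxor (↑(n % 8)) 2 = ↑((n % 8) ^^^ 2) := by
    exact_mod_cast PySem.Int.bxor_natCast (n % 8) 2
  rw [h1, h2]
  show PySem.Int.mod (PySem.Int.bxor (PySem.Int.bxor (↑(n % 8 ^^^ 2))
      ((↑n : Int) >>> ((↑(n % 8 ^^^ 2) : Int)).toNat)) 3) 8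
    = ↑(((n % 8 ^^^ 2) ^^^ (n >>> (n % 8 ^^^ 2)) ^^^ 3) % 8)
  rw [Int.toNat_natCast]
  have h4 : (↑n : Int) >>> ((n % 8) ^^^ 2) = ↑(n >>> ((n % 8) ^^^ 2)) := by
    simp [Int.shiftRight_eq_div_pow, Nat.shiftRight_eq_div_pow]
  rw [h4, PySem.Int.bxor_natCast]
  have h5 : PySem.Int.bxor (↑(((n % 8) ^^^ 2) ^^^ n >>> ((n % 8) ^^^ 2))) 3
      = ↑((((n % 8) ^^^ 2) ^^^ n >>> ((n % 8) ^^^ 2)) ^^^ 3) := by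
    exact_mod_cast PySem.Int.bxor_natCast _ 3
  rw [h5]
  exact_mod_cast PySem.Int.mod_natCast _ 8

theorem fN_lt (n : Nat) : fN n < 8 := by
  unfold fN; exact Nat.mod_lt _ (by norm_num)

-- f depends only on the low 10 bits of its (nonnegative) argument
theorem fN_mod (n : Nat) : fN (n % 1024) = fN n := by
  unfold fN
  have h8 : (n % 1024) % 8 = n % 8 := by omega
  rw [h8]
  have hb : (n % 8) ^^^ 2 < 8 := Nat.xor_lt_two_pow (n := 3) (by omega) (by norm_num)
  generalize (n % 8) ^^^ 2 = b at hb
  have key : (n % 1024) >>> b % 8 = n >>> b % 8 := by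
    rw [Nat.shiftRight_eq_div_pow, Nat.shiftRight_eq_div_pow]
    interval_cases b <;> omega
  show _ % 2 ^ 3 = _ % 2 ^ 3
  rw [Nat.xor_mod_two_pow, Nat.xor_mod_two_pow, Nat.xor_mod_two_pow, Nat.xor_mod_two_pow, key]

theorem bTable_get (k : Nat) (hk : k < 1024) : PySem.List.pyGetD bTable (↑k) 0 = ↑(fN k) := by
  unfold bTable
  rw [show (1024 : Int) = ((1024 : Nat) : Int) by norm_num,
    PySem.List.pyGetD_map_pyRange pyF 1024 k 0 hk, pyF_natCast]

-- range(m*1024), filtered by a block-invariant predicate, splits into 1024-blocks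
set_option maxRecDepth 8192 in
theorem filter_range_blocks (q : Nat → Bool) (hq : ∀ j k, k < 1024 → q (1024 * j + k) = q k) :
    ∀ m : Nat, (List.range (m * 1024)).filter q
      = (List.range m).flatMap (fun j => ((List.range 1024).filter q).map (fun k => 1024 * j + k)) := by
  intro m
  induction m with
  | zero => simp
  | succ m ih =>
    conv_rhs => rw [show List.range (m+1) = List.range m ++ [m] from List.range_succ]
    rw [List.flatMap_append, ← ih,
      show (m + 1) * 1024 = m * 1024 + 1024 by ring, List.range_add, List.filter_append]
    congr 1
    simp only [List.flatMap_cons, List.flatMap_nil, List.append_nil]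
    rw [List.filter_map]
    refine Eq.trans (congrArg _ (List.filter_congr ?_)) (List.map_congr_left ?_)
    · intro k hk
      simp only [Function.comp]
      rw [show m * 1024 + k = 1024 * m + k by ring, hq m k (List.mem_range.mp hk)]
    · intro k _
      ring

set_option maxRecDepth 8192 in
theorem first_set_eq (d : Int) :
    (PySem.List.pyRange 0 1048576).foldl
      (fun (acc : List Int) (a : Int) => if pyF a == d then acc ++ [a] else acc) []
    = (PySem.List.pyRange 0 1024).flatMap
        (fun (j : Int) => ((PySem.List.pyRange 0 1024).filter
            (fun r => PySem.List.pyGetD bTable r 0 == d)).map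
          (fun r => PySem.Int.bor (j <<< (10 : Nat)) r)) := by
  have hfold := PySem.List.foldl_append_if (fun a => pyF a == d) (fun a => a)
    (PySem.List.pyRange 0 1048576) []
  simp only [List.map_id_fun', id] at hfold
  rw [hfold]
  simp only [List.nil_append]
  rw [show (1048576 : Int) = ((1048576 : Nat) : Int) by norm_num,
    show (1024 : Int) = ((1024 : Nat) : Int) by norm_num,
    PySem.List.pyRange_zero_natCast, PySem.List.pyRange_zero_natCast,
    List.filter_map, List.flatMap_map, List.filter_map]
  have hq : ∀ j k : Nat, k < 1024 → ((↑(fN (1024 * j + k)) : Int) == d) = ((↑(fN k) : Int) == d) := by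
    intro j k hk
    rw [← fN_mod (1024 * j + k), show (1024 * j + k) % 1024 = k by omega]
  calc List.map (fun k : Nat => (↑k : Int))
        (List.filter ((fun r => pyF r == d) ∘ fun k : Nat => (↑k : Int)) (List.range 1048576))
      = List.map (fun k : Nat => (↑k : Int))
        (List.filter (fun k => (↑(fN k) : Int) == d) (List.range 1048576)) := by
        exact congrArg _ (List.filter_congr (fun k _ => by simp only [Function.comp, pyF_natCast]))
    _ = List.map (fun k : Nat => (↑k : Int))
        ((List.range 1024).flatMap (fun j =>
          ((List.range 1024).filter (fun k => (↑(fN k) : Int) == d)).map (fun k => 1024 * j + k))) := by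
        rw [show (1048576 : Nat) = 1024 * 1024 from rfl,
          filter_range_blocks (fun k => (↑(fN k) : Int) == d) hq 1024]
    _ = (List.range 1024).flatMap (fun j =>
          ((List.range 1024).filter (fun k => (↑(fN k) : Int) == d)).map
            (fun k => ((1024 * j + k : Nat) : Int))) := by
        rw [List.map_flatMap]
        exact List.flatMap_congr (fun j _ => by rw [List.map_map]; rfl)
    _ = _ := by
        refine List.flatMap_congr (fun j _ => ?_)
        rw [List.map_map]
        refine Eq.trans (List.map_congr_left ?_) (congrArg _ (List.filter_congr ?_))
        · intro k hk
          have hk2 : k < 1024 := List.mem_range.mp (List.mem_filter.mp hk).1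
          simp only [Function.comp]
          have : (↑j : Int) <<< (10 : Nat) = ↑(j <<< 10) := by
            simp [Int.shiftLeft_eq, Nat.shiftLeft_eq]
          rw [this, PySem.Int.bor_natCast,
            ← Nat.shiftLeft_add_eq_or_of_lt (show k < 2 ^ 10 by omega), Nat.shiftLeft_eq]
          norm_num [Nat.mul_comm]
        · intro k hk
          simp only [Function.comp]
          rw [bTable_get k (List.mem_range.mp hk)]

theorem pyF_bounds (c : Int) (hc : 0 ≤ c) : 0 ≤ pyF c ∧ pyF c < 8 := by
  obtain ⟨m, rfl⟩ := Int.eq_ofNat_of_zero_le hc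
  rw [pyF_natCast]
  exact ⟨Int.natCast_nonneg _, by exact_mod_cast fN_lt m⟩

-- B's precomputed extension list is exactly A's inner filter
theorem ext_get (m : Nat) (nxt : Int) (h0 : 0 ≤ nxt) (h8 : nxt < 8) :
    PySem.List.pyGetD (PySem.List.pyGetD bExt (PySem.Int.band (↑m) 127) []) nxt []
    = (PySem.List.pyRange 0 8).filter
        (fun x => pyF (((↑m : Int) <<< (3 : Nat)) + x) == nxt) := by
  have hband : PySem.Int.band (↑m) 127 = ↑(m % 128) := by
    have h := PySem.Int.band_natCast m 127
    rw [show ((127 : Nat) : Int) = 127 by norm_num] at h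
    rw [h, show (127 : Nat) = 2 ^ 7 - 1 from rfl, Nat.and_two_pow_sub_one_eq_mod]
  rw [hband]
  unfold bExt
  rw [show (128 : Int) = ((128 : Nat) : Int) by norm_num,
    PySem.List.pyGetD_map_pyRange _ 128 (m % 128) [] (Nat.mod_lt m (by norm_num))]
  rw [show nxt = ((nxt.toNat : Nat) : Int) from (Int.toNat_of_nonneg h0).symm,
    show (8 : Int) = ((8 : Nat) : Int) by norm_num,
    PySem.List.pyGetD_map_pyRange _ 8 nxt.toNat [] (by omega : nxt.toNat < 8)]
  refine List.filter_congr ?_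
  intro x hx
  rw [PySem.List.mem_pyRange_one] at hx
  obtain ⟨xk, rfl⟩ := Int.eq_ofNat_of_zero_le hx.1
  have hxk : xk < 8 := by exact_mod_cast hx.2
  have hc1 : ((↑(m % 128) : Int) <<< (3 : Nat)) + ↑xk = ↑((m % 128) * 8 + xk) := by
    simp [Int.shiftLeft_eq]
  have hc2 : ((↑m : Int) <<< (3 : Nat)) + ↑xk = ↑(m * 8 + xk) := by
    simp [Int.shiftLeft_eq]
  rw [hc1, hc2, bTable_get _ (by omega), pyF_natCast,
    show fN (m * 8 + xk) = fN ((m % 128) * 8 + xk) by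
      rw [← fN_mod (m * 8 + xk), show (m * 8 + xk) % 1024 = (m % 128) * 8 + xk by omega]]

-- A's nested foldl over candidates × range(8) is a flatMap of filtered maps
theorem nsA_eq (nxt : Int) (cur : List Int) :
    cur.foldl (fun (acc : List Int) (c : Int) =>
      (PySem.List.pyRange 0 8).foldl (fun (acc2 : List Int) (x : Int) =>
        if pyF ((c <<< (3 : Nat)) + x) == nxt then acc2 ++ [(c <<< (3 : Nat)) + x]
        else acc2) acc) []
    = cur.flatMap (fun (c : Int) =>
        ((PySem.List.pyRange 0 8).filter (fun x => pyF ((c <<< (3 : Nat)) + x) == nxt)).map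
          (fun x => (c <<< (3 : Nat)) + x)) := by
  have h1 : (fun (acc : List Int) (c : Int) =>
      (PySem.List.pyRange 0 8).foldl (fun (acc2 : List Int) (x : Int) =>
        if pyF ((c <<< (3 : Nat)) + x) == nxt then acc2 ++ [(c <<< (3 : Nat)) + x]
        else acc2) acc)
      = (fun (acc : List Int) (c : Int) => acc ++ ((PySem.List.pyRange 0 8).filter
          (fun x => pyF ((c <<< (3 : Nat)) + x) == nxt)).map (fun x => (c <<< (3 : Nat)) + x)) := by
    funext acc c
    exact PySem.List.foldl_append_if (fun x => pyF ((c <<< (3 : Nat)) + x) == nxt)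
      (fun x => (c <<< (3 : Nat)) + x) _ acc
  rw [h1, PySem.List.foldl_append_eq_flatMap, List.nil_append]

theorem loop_eq (rest : List Int) : ∀ cur : List Int, (∀ c ∈ cur, 0 ≤ c) →
    solveLoopA cur rest = solveLoopB cur rest := by
  induction rest with
  | nil => intro cur _; rfl
  | cons nxt rs ih =>
    intro cur hcur
    simp only [solveLoopA, solveLoopB, nsA_eq nxt cur]
    by_cases h : 0 ≤ nxt ∧ nxt < 8
    · rw [if_pos h]
      have hsame : cur.flatMap (fun (c : Int) =>
          ((PySem.List.pyRange 0 8).filter (fun x => pyF ((c <<< (3 : Nat)) + x) == nxt)).map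
            (fun x => (c <<< (3 : Nat)) + x))
          = cur.flatMap (fun (c : Int) =>
          (PySem.List.pyGetD (PySem.List.pyGetD bExt (PySem.Int.band c 127) []) nxt []).map
            (fun x => (c <<< (3 : Nat)) + x)) := by
        refine List.flatMap_congr (fun c hc => ?_)
        obtain ⟨mm, rfl⟩ := Int.eq_ofNat_of_zero_le (hcur c hc)
        rw [ext_get mm nxt h.1 h.2]
      rw [← hsame]
      have hnn' : ∀ c' ∈ cur.flatMap (fun (c : Int) =>
          ((PySem.List.pyRange 0 8).filter (fun x => pyF ((c <<< (3 : Nat)) + x) == nxt)).map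
            (fun x => (c <<< (3 : Nat)) + x)), 0 ≤ c' := by
        intro c' hc'
        simp only [List.mem_flatMap, List.mem_map, List.mem_filter] at hc'
        obtain ⟨c, hc, x, ⟨hx, _⟩, rfl⟩ := hc'
        rw [PySem.List.mem_pyRange_one] at hx
        rw [Int.shiftLeft_eq]
        exact add_nonneg (mul_nonneg (hcur c hc) (by norm_num)) hx.1
      split_ifs with he
      · rfl
      · exact ih _ hnn'
    · rw [if_neg h]
      have hempty : cur.flatMap (fun (c : Int) =>
          ((PySem.List.pyRange 0 8).filter (fun x => pyF ((c <<< (3 : Nat)) + x) == nxt)).map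
            (fun x => (c <<< (3 : Nat)) + x)) = [] := by
        refine List.flatMap_eq_nil_iff.mpr (fun c hc => ?_)
        refine List.map_eq_nil_iff.mpr (List.filter_eq_nil_iff.mpr (fun x hx => ?_))
        rw [PySem.List.mem_pyRange_one] at hx
        have hnn : 0 ≤ (c <<< (3 : Nat)) + x := by
          rw [Int.shiftLeft_eq]
          exact add_nonneg (mul_nonneg (hcur c hc) (by norm_num)) hx.1
        have hb := pyF_bounds _ hnn
        simp only [beq_iff_eq]
        intro heq
        rw [heq] at hb
        exact h ⟨hb.1, hb.2⟩
      rw [hempty, if_pos rfl]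

-- ===== VERDICT (by name: the statement is the Claim_ definition above) =====
theorem solve_outputs_spec : Claim_equal_solve_outputs := by
  intro outputs _ hpre
  unfold Spec_solve_outputs
  match outputs with
  | [] => exact absurd rfl hpre
  | d :: rest =>
    show solveLoopA _ rest = solveLoopB _ rest
    rw [first_set_eq d]
    apply loop_eq
    intro c hc
    simp only [List.mem_flatMap, List.mem_map, List.mem_filter] at hc
    obtain ⟨j, hj, r, ⟨hr, _⟩, rfl⟩ := hc
    rw [PySem.List.mem_pyRange_one] at hj hr
    have h1 : (0:Int) ≤ j <<< (10:Nat) := by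
      rw [Int.shiftLeft_eq]; exact mul_nonneg hj.1 (by norm_num)
    rw [PySem.Int.bor_of_nonneg h1 hr.1]
    exact Int.natCast_nonneg _
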